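-- pv_equiv track=rewrite | github.com/Panseung/python_SSAFY_SWEA-study | 2022-07-4/1493.py | solve
-- ===== SOURCE A (Python) =====
-- def solve(num):
--     v = 1
--     y = 1
--     x = 1
--     while v < num:
--         x += 1
--         y -= 1
--         if y == 0:
--             y = x
--             x = 1
--         v += 1
--     return [y, x]
-- ===== SOURCE B (Python) =====
-- def solve(num):
--     d = 1  # current diagonal, whose last cell has index t = d*(d+1)//2
--     t = 1
--     while t < num:
--         d += 1
--         t += d
--     k = num - (t - d)  # 1-based offset of num within diagonal d
--     return [d - k + 1, k]
-- ===== Notes on version B (the rewrite author's own statement) =====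
-- stated objective: faster
-- what changed: Replaces A's cell-by-cell walk over all num positions with a diagonal-by-diagonal search (triangular-number accumulation) plus an arithmetic offset inside the found diagonal.
-- outside the precondition, e.g. on solve(0): A returns [1, 1], B returns [2, 0]
import Mathlib
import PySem

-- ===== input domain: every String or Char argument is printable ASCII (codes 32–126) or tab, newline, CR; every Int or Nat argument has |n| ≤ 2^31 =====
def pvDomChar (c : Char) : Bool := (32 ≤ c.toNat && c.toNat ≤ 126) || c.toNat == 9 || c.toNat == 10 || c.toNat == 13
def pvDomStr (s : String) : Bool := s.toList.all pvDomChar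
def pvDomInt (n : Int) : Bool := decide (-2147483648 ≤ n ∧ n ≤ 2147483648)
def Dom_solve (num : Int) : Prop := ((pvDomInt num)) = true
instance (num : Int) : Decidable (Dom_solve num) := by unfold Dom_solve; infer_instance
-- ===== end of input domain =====

-- B replaces A's cell-by-cell walk (num iterations) with a diagonal-by-diagonal
-- search plus an arithmetic offset inside the found diagonal.

-- ===== PORT A =====
-- A's while-loop: v counts cells, (y, x) is the current coordinate.
def solveLoop (v y x num : Int) : List Int :=
  if v < num then
    let x1 := x + 1
    let y1 := y - 1
    if y1 = 0 then solveLoop (v + 1) x1 1 num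
    else solveLoop (v + 1) y1 x1 num
  else [y, x]
termination_by (num - v).toNat
decreasing_by
  · omega
  · omega

def solve (num : Int) : List Int := solveLoop 1 1 1 num

-- ===== PORT B =====
-- B's while-loop; d and t are always positive in Python, so they are carried as
-- Nat here (same values), which gives the termination measure (num - t).toNat.
def solveAltLoop (d t : Nat) (num : Int) : List Int :=
  if (t : Int) < num then solveAltLoop (d + 1) (t + (d + 1)) num
  else
    let k : Int := num - ((t : Int) - (d : Int))
    [(d : Int) - k + 1, k]
termination_by (num - t).toNat
decreasing_by omega

def solve_alt (num : Int) : List Int := solveAltLoop 1 1 num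

-- ===== PRECONDITION & SPEC =====
-- Pre_ excludes non-positive num: positions of the traversal are counted from
-- one, so such num is outside the natural domain (A returns its untouched
-- initial state there, B extrapolates the arithmetic).
def Pre_solve (num : Int) : Prop := 1 ≤ num
instance (num : Int) : Decidable (Pre_solve num) := by unfold Pre_solve; infer_instance
def pvWitness_solve : Int := 5
def Spec_solve (num : Int) (out : List Int) : Prop := out = solve_alt num
instance (num : Int) (out : List Int) : Decidable (Spec_solve num out) := by unfold Spec_solve; infer_instance

-- ===== CLAIM (what is proved, stated in full; the proofs are below) =====
def Claim_equal_solve : Prop := ∀ (num : Int), Dom_solve num → Pre_solve num → Spec_solve num (solve num)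

-- ===== LEMMAS AND PROOFS =====

-- the stream of coordinates: pvG m = coordinate of cell m+1
def pvStep (p : Int × Int) : Int × Int :=
  if p.1 - 1 = 0 then (p.2 + 1, 1) else (p.1 - 1, p.2 + 1)

def pvG : Nat → Int × Int
  | 0 => (1, 1)
  | m + 1 => pvStep (pvG m)

def pvTri : Nat → Nat
  | 0 => 0
  | d + 1 => pvTri d + (d + 1)

-- closed form of the stream: cell k of diagonal e+1 (1 ≤ k ≤ e+1)
lemma pvG_closed : ∀ (e k : Nat), 1 ≤ k → k ≤ e + 1 →
    pvG (pvTri e + (k - 1)) = ((e : Int) + 2 - k, (k : Int)) := by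
  intro e
  induction e with
  | zero =>
    intro k hk1 hk2
    have hk : k = 1 := by omega
    subst hk
    simp [pvTri, pvG]
  | succ e ih =>
    intro k hk1 hk2
    induction k with
    | zero => omega
    | succ k ihk =>
      rcases Nat.eq_or_lt_of_le hk1 with h1 | h1
      · -- k + 1 = 1 : first cell of diagonal e+2, successor of last cell of diagonal e+1
        have hk0 : k = 0 := by omega
        subst hk0
        have hlast := ih (e + 1) (by omega) (by omega)
        have harg : pvTri (e + 1) + (1 - 1) = (pvTri e + (e + 1 - 1)) + 1 := by
          simp [pvTri]; omega
        rw [harg, pvG, hlast, pvStep]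
        rw [if_pos (by push_cast; try ring)]
        simp only [Prod.mk.injEq]
        refine ⟨by push_cast; try ring, by push_cast; try ring⟩
      · -- k + 1 ≥ 2 : successor within diagonal e+2
        have hprev := ihk (by omega) (by omega)
        have harg : pvTri (e + 1) + (k + 1 - 1) = (pvTri (e + 1) + (k - 1)) + 1 := by
          omega
        rw [harg, pvG, hprev, pvStep]
        have hkle : (k : Int) ≤ (e : Int) + 1 := by exact_mod_cast (show k ≤ e + 1 by omega)
        rw [if_neg (by push_cast; omega)]
        simp only [Prod.mk.injEq]
        refine ⟨by push_cast; try ring, by push_cast; try ring⟩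

-- A's loop follows the stream
lemma solveLoop_eq : ∀ (c : Nat) (v y x num : Int), v + c = num → 1 ≤ v →
    (y, x) = pvG (v.toNat - 1) →
    solveLoop v y x num = [(pvG (num.toNat - 1)).1, (pvG (num.toNat - 1)).2] := by
  intro c
  induction c with
  | zero =>
    intro v y x num hvc hv hst
    have hv' : ¬ v < num := by omega
    rw [solveLoop, if_neg hv']
    have : num.toNat - 1 = v.toNat - 1 := by omega
    rw [this, ← hst]
  | succ c ih =>
    intro v y x num hvc hv hst
    have hv' : v < num := by omega
    have hnext : pvG ((v + 1).toNat - 1) = pvStep (y, x) := by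
      have h1 : (v + 1).toNat - 1 = (v.toNat - 1) + 1 := by omega
      rw [h1, pvG, ← hst]
    rw [solveLoop, if_pos hv']
    by_cases hy : y - 1 = 0
    · simp only [hy, if_pos]
      have : (x + 1, (1 : Int)) = pvG ((v + 1).toNat - 1) := by
        rw [hnext, pvStep]; simp [hy]
      exact ih (v + 1) _ _ num (by omega) (by omega) this
    · simp only [hy, if_neg, not_false_iff]
      have : (y - 1, x + 1) = pvG ((v + 1).toNat - 1) := by
        rw [hnext, pvStep]; simp [hy]
      exact ih (v + 1) _ _ num (by omega) (by omega) this

-- B's loop at exit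
lemma solveAltLoop_exit (e : Nat) (num : Int)
    (ht : ¬ ((pvTri (e + 1) : Int) < num)) (hlt : (pvTri e : Int) < num) :
    solveAltLoop (e + 1) (pvTri (e + 1)) num
      = [(pvG (num.toNat - 1)).1, (pvG (num.toNat - 1)).2] := by
  rw [solveAltLoop, if_neg ht]
  have htd : (pvTri (e + 1) : Int) - ((e : Int) + 1) = (pvTri e : Int) := by
    have : pvTri (e + 1) = pvTri e + (e + 1) := by simp [pvTri]
    omega
  have hsum : (pvTri (e + 1) : Int) = (pvTri e : Int) + ((e : Int) + 1) := by
    have : pvTri (e + 1) = pvTri e + (e + 1) := by simp [pvTri]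
    omega
  have hk1 : 1 ≤ num - (pvTri e : Int) := by omega
  have hk2 : num - (pvTri e : Int) ≤ (e : Int) + 1 := by omega
  have hkc : (((num - (pvTri e : Int)).toNat : Nat) : Int) = num - (pvTri e : Int) := by omega
  have hcl := pvG_closed e (num - (pvTri e : Int)).toNat (by omega) (by omega)
  have hidx : num.toNat - 1 = pvTri e + ((num - (pvTri e : Int)).toNat - 1) := by omega
  rw [hidx, hcl]
  simp only [hkc, List.cons.injEq, and_true]
  constructor <;> (push_cast; omega)

-- B's loop lands on the same stream element
lemma solveAltLoop_eq : ∀ (fuel e : Nat) (num : Int),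
    (num - (pvTri (e + 1) : Int)).toNat ≤ fuel → (pvTri e : Int) < num →
    solveAltLoop (e + 1) (pvTri (e + 1)) num
      = [(pvG (num.toNat - 1)).1, (pvG (num.toNat - 1)).2] := by
  intro fuel
  induction fuel with
  | zero =>
    intro e num hfuel hlt
    exact solveAltLoop_exit e num (by omega) hlt
  | succ fuel ih =>
    intro e num hfuel hlt
    by_cases ht : (pvTri (e + 1) : Int) < num
    · rw [solveAltLoop, if_pos ht]
      have harg : pvTri (e + 1) + (e + 1 + 1) = pvTri (e + 1 + 1) := by simp [pvTri]
      rw [harg]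
      refine ih (e + 1) num ?_ ht
      have h2 : pvTri (e + 1 + 1) = pvTri (e + 1) + (e + 1 + 1) := by simp [pvTri]
      omega
    · exact solveAltLoop_exit e num ht hlt

-- ===== VERDICT (by name: the statement is the Claim_ definition above) =====
theorem solve_spec : Claim_equal_solve := by
  intro num _hdom hpre
  have h1n : (1 : Int) ≤ num := hpre
  unfold Spec_solve solve solve_alt
  have hA := solveLoop_eq (num - 1).toNat 1 1 1 num (by omega) (by omega)
    (by norm_num [pvG])
  have htri1 : pvTri 1 = 1 := by simp [pvTri]
  have hB := solveAltLoop_eq (num - 1).toNat 0 num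
    (by rw [htri1]; omega) (by simp [pvTri]; omega)
  rw [htri1] at hB
  rw [hA, ← hB]
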